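-- pv_equiv track=rewrite | github.com/MohamedRuzaik9/MyProjects-Academic | Python-Projects/BST-AVL-Trees/Q1 - Task2 Complete BST.py | complete_bst_seq
-- ===== SOURCE A (Python) =====
-- def calculate_root_index(A):
--     n = len(A)
--     if n == 0:
--         return -1
--
--     # Calculate the height of the complete tree
--     h = 0
--     while (1 << (h+1)) - 1 <= n:
--         h += 1
--
--     # Number of nodes in the last level
--     last_level = n - ((1 << h) - 1)
--
--     # Maximum possible nodes in last level
--     max_last_level = 1 << h
--
--     if last_level <= max_last_level // 2:
--         return n - 1 - ((1 << (h-1)) - 1)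
--     else:
--         return (1 << h) - 1
--
-- def complete_bst_seq(A, B):
--     n = len(A)
--     if n == 0:
--         return B
--
--     root_index = calculate_root_index(A)
--     B.append(A[root_index])
--     complete_bst_seq(A[:root_index], B)
--     complete_bst_seq(A[root_index+1:], B)
--
--     return B
-- ===== SOURCE B (Python) =====
-- def _root(m):
--     # 0-based inorder position of the root of a complete tree with m >= 1 nodes (closed form).
--     h = (m + 1).bit_length() - 1
--     return min((1 << h) - 1, m - (1 << (h - 1)))
--
-- def complete_bst_seq(A, B):
--     # Iterative: explicit stack of index ranges, closed-form root; no slice copies. Mutates B like A does.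
--     stack = [(0, len(A))]
--     while stack:
--         lo, hi = stack.pop()
--         m = hi - lo
--         if m == 0:
--             continue
--         r = _root(m)
--         B.append(A[lo + r])
--         stack.append((lo + r + 1, hi))
--         stack.append((lo, lo + r))
--     return B
-- ===== Notes on version B (the rewrite author's own statement) =====
-- stated objective: alternative
-- what changed: Replaces A's recursion on copied slices (with a while-loop height search per call) by a single iterative loop over an explicit stack of index ranges with a closed-form bit_length root formula, so no sublist copies are made.
import Mathlib
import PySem

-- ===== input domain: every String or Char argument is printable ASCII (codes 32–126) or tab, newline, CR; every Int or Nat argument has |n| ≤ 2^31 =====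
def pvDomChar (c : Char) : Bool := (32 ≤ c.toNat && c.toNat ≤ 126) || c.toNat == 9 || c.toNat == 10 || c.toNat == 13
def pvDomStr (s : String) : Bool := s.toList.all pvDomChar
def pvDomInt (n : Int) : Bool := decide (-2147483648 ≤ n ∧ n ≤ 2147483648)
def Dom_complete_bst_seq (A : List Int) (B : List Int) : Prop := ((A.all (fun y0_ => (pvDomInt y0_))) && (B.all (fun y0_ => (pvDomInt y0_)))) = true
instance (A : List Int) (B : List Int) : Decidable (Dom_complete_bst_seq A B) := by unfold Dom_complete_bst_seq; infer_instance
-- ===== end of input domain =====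

-- B replaces A's slice-copying recursion (with a per-call while-loop height search) by one
-- iterative loop over an explicit stack of index ranges with a closed-form bit_length root;
-- both mutate B by appending (the theorem is about the returned value).


-- ===== PORT A =====
-- while (1 << (h+1)) - 1 <= n: h += 1   (all quantities are nonnegative Python ints, so Nat arithmetic is exact)
-- termination helper for the loop below (cited by decreasing_by)
theorem calcLoopH_dec (n h : Nat) (hc : 2 ^ (h + 1) - 1 ≤ n) :
    n + 1 - 2 ^ (h + 1) < n + 1 - 2 ^ h := by
  have hp : 2 ^ h < 2 ^ (h + 1) := Nat.pow_lt_pow_succ one_lt_two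
  have hle : 2 ^ (h + 1) ≤ n + 1 := Nat.sub_le_iff_le_add.mp hc
  exact Nat.sub_lt_sub_left (Nat.lt_of_lt_of_le hp hle) hp

def calcLoopH (n : Nat) (h : Nat) : Nat :=
  if 2 ^ (h + 1) - 1 ≤ n then calcLoopH n (h + 1) else h
termination_by n + 1 - 2 ^ h
decreasing_by exact calcLoopH_dec n h (by assumption)


-- calculate_root_index: every intermediate value is a nonnegative Python int (for n ≥ 1 the loop
-- gives h ≥ 1, so `1 << (h-1)` is reachable only with h ≥ 1 and Nat subtraction never truncates);
-- `//` on nonnegative ints is Nat division.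
def calculate_root_index (A : List Int) : Int :=
  let n := A.length
  if n = 0 then -1
  else
    let h := calcLoopH n 0
    let last_level := n - (2 ^ h - 1)
    let max_last_level := 2 ^ h
    if last_level ≤ max_last_level / 2 then ((n - 1 - (2 ^ (h - 1) - 1) : Nat) : Int)
    else ((2 ^ h - 1 : Nat) : Int)

-- termination helper for the port below (cited by decreasing_by)
theorem calc_root_bounds (A : List Int) (hA : A.length ≠ 0) :
    0 ≤ calculate_root_index A ∧ (calculate_root_index A).toNat < A.length := by
  unfold calculate_root_index
  simp only [hA, if_false]
  split
  · refine ⟨Int.natCast_nonneg _, ?_⟩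
    rw [Int.toNat_natCast]
    exact lt_of_le_of_lt (Nat.sub_le _ _) (Nat.sub_lt (Nat.pos_of_ne_zero hA) Nat.one_pos)
  · rename_i hcond
    refine ⟨Int.natCast_nonneg _, ?_⟩
    rw [Int.toNat_natCast]
    exact Nat.sub_ne_zero_iff_lt.mp fun h => hcond (le_of_eq_of_le h (Nat.zero_le _))

-- termination helpers for the port below (cited by decreasing_by)
theorem portA_dec1 (A : List Int) (hn : A.length ≠ 0) :
    (PySem.List.slice A none (some (calculate_root_index A))).length < A.length := by
  obtain ⟨hr0, hrlt⟩ := calc_root_bounds A hn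
  rw [PySem.List.slice_to A hr0, List.length_take]
  exact lt_of_le_of_lt (Nat.min_le_left _ _) hrlt

theorem portA_dec2 (A : List Int) (hn : A.length ≠ 0) :
    (PySem.List.slice A (some (calculate_root_index A + 1)) none).length < A.length := by
  obtain ⟨hr0, hrlt⟩ := calc_root_bounds A hn
  rw [PySem.List.slice_from A (le_trans hr0 (Int.le_add_one le_rfl)), List.length_drop]
  refine Nat.sub_lt (Nat.pos_of_ne_zero hn) ?_
  have hpos : (0 : Int) < calculate_root_index A + 1 := Int.lt_add_one_of_le hr0
  exact Int.pos_iff_toNat_pos.mp hpos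

def complete_bst_seq (A : List Int) (B : List Int) : List Int :=
  let n := A.length
  if hn : n = 0 then B
  else
    let r := calculate_root_index A
    let B1 := B ++ [PySem.List.pyGetD A r 0]   -- B.append(A[root_index]); r is always in range
    let B2 := complete_bst_seq (PySem.List.slice A none (some r)) B1
    complete_bst_seq (PySem.List.slice A (some (r + 1)) none) B2
termination_by A.length
decreasing_by
  · exact portA_dec1 A hn
  · exact portA_dec2 A hn

-- ===== PORT B =====
-- _root(m): closed-form root position via bit_length (m ≥ 1; all values nonnegative, Nat is exact)
def rootClosed (m : Nat) : Nat :=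
  let h := PySem.Int.bitLength ((m : Int) + 1) - 1
  min (2 ^ h - 1) (m - 2 ^ (h - 1))

theorem rootClosed_lt {m : Nat} (hm : 1 ≤ m) : rootClosed m < m := by
  simp only [rootClosed]
  exact lt_of_le_of_lt (Nat.min_le_right _ _) (Nat.sub_lt hm Nat.one_le_two_pow)

-- termination helpers for the stack loop (cited by decreasing_by)
theorem altLoop_dec1 (lo hi : Nat) (stack : List (Nat × Nat)) :
    ((stack.map fun p => 2 * (p.2 - p.1) + 1).sum) <
      ((((lo, hi) :: stack).map fun p => 2 * (p.2 - p.1) + 1).sum) := by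
  simp only [List.map_cons, List.sum_cons]
  exact Nat.lt_add_of_pos_left (Nat.succ_pos _)

theorem altLoop_dec2 (lo hi : Nat) (stack : List (Nat × Nat)) (hz : hi - lo ≠ 0) :
    ((((lo, lo + rootClosed (hi - lo)) :: (lo + rootClosed (hi - lo) + 1, hi) :: stack).map
        fun p => 2 * (p.2 - p.1) + 1).sum) <
      ((((lo, hi) :: stack).map fun p => 2 * (p.2 - p.1) + 1).sum) := by
  have hr := rootClosed_lt (Nat.pos_of_ne_zero hz)
  simp only [List.map_cons, List.sum_cons]
  omega

-- the while-loop over the explicit stack; list head = top of stack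
def altLoop (A : List Int) : List (Nat × Nat) → List Int → List Int
  | [], B => B
  | (lo, hi) :: stack, B =>
    let m := hi - lo
    if m = 0 then altLoop A stack B
    else
      let r := rootClosed m
      altLoop A ((lo, lo + r) :: (lo + r + 1, hi) :: stack) (B ++ [A.getD (lo + r) 0])
termination_by stack => (stack.map (fun p => 2 * (p.2 - p.1) + 1)).sum
decreasing_by
  · exact altLoop_dec1 lo hi stack
  · exact altLoop_dec2 lo hi stack (by assumption)

def complete_bst_seq_alt (A : List Int) (B : List Int) : List Int :=
  altLoop A [(0, A.length)] B

-- ===== PRECONDITION & SPEC =====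
def Spec_complete_bst_seq (A : List Int) (B : List Int) (out : List Int) : Prop := out = complete_bst_seq_alt A B
instance (A : List Int) (B : List Int) (out : List Int) : Decidable (Spec_complete_bst_seq A B out) := by unfold Spec_complete_bst_seq; infer_instance

-- ===== CLAIM (what is proved, stated in full; the proofs are below) =====
def Claim_equal_complete_bst_seq : Prop := ∀ (A : List Int) (B : List Int), Dom_complete_bst_seq A B → Spec_complete_bst_seq A B (complete_bst_seq A B)

-- ===== LEMMAS AND PROOFS =====

-- mid-level reference: the divide-and-conquer on index ranges, as a recursion
def rangeGo (A : List Int) (lo hi : Nat) (B : List Int) : List Int :=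
  if _hle : hi ≤ lo then B
  else
    rangeGo A (lo + rootClosed (hi - lo) + 1) hi
      (rangeGo A lo (lo + rootClosed (hi - lo))
        (B ++ [A.getD (lo + rootClosed (hi - lo)) 0]))
termination_by hi - lo
decreasing_by
  all_goals
    have h1 : 1 ≤ 2 ^ (PySem.Int.bitLength ((↑(hi - lo) : Int) + 1) - 1 - 1) := Nat.one_le_two_pow
    simp only [rootClosed]
    omega

theorem rangeGo_eq (A : List Int) (lo hi : Nat) (B : List Int) : rangeGo A lo hi B =
    if hi ≤ lo then B
    else
      rangeGo A (lo + rootClosed (hi - lo) + 1) hi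
        (rangeGo A lo (lo + rootClosed (hi - lo))
          (B ++ [A.getD (lo + rootClosed (hi - lo)) 0])) := by
  rw [rangeGo]
  split <;> rfl

-- the loop h satisfies 2^h ≤ n+1 < 2^(h+1) (fuel-indexed strong induction along the loop)
theorem calcLoopH_spec_aux : ∀ (k n h : Nat), n + 1 - 2 ^ h ≤ k → 2 ^ h ≤ n + 1 →
    2 ^ calcLoopH n h ≤ n + 1 ∧ n + 1 < 2 ^ (calcLoopH n h + 1) := by
  intro k
  induction k with
  | zero =>
    intro n h hk hh
    have h1 : 1 ≤ 2 ^ h := Nat.one_le_two_pow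
    have h2 : 2 ^ (h + 1) = 2 * 2 ^ h := by rw [Nat.pow_succ]; ring
    rw [calcLoopH]
    split
    · omega
    · exact ⟨hh, by omega⟩
  | succ k ih =>
    intro n h hk hh
    have h1 : 1 ≤ 2 ^ h := Nat.one_le_two_pow
    have h2 : 2 ^ (h + 1) = 2 * 2 ^ h := by rw [Nat.pow_succ]; ring
    rw [calcLoopH]
    split
    · exact ih n (h + 1) (by omega) (by omega)
    · exact ⟨hh, by omega⟩

theorem calcLoopH_spec (n : Nat) (h : Nat) (hh : 2 ^ h ≤ n + 1) :
    2 ^ calcLoopH n h ≤ n + 1 ∧ n + 1 < 2 ^ (calcLoopH n h + 1) :=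
  calcLoopH_spec_aux (n + 1 - 2 ^ h) n h le_rfl hh

-- the closed-form h of rootClosed satisfies the same bracket
theorem bitLength_h (m : Nat) :
    2 ^ (PySem.Int.bitLength ((m : Int) + 1) - 1) ≤ m + 1 ∧
    m + 1 < 2 ^ (PySem.Int.bitLength ((m : Int) + 1) - 1 + 1) := by
  have hcast : ((m : Int) + 1) = ((m + 1 : Nat) : Int) := by push_cast; ring
  have hne : ((m : Int) + 1) ≠ 0 := by omega
  have habs : ((m : Int) + 1).natAbs = m + 1 := by rw [hcast, Int.natAbs_natCast]
  have hlt := PySem.Int.lt_two_pow_bitLength ((m : Int) + 1)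
  have hle := PySem.Int.two_pow_bitLength_le ((m : Int) + 1) hne
  rw [habs] at hlt hle
  have hbl : 1 ≤ PySem.Int.bitLength ((m : Int) + 1) := by
    by_contra hc
    interval_cases h : PySem.Int.bitLength ((m : Int) + 1)
    simp_all
  refine ⟨hle, ?_⟩
  rwa [Nat.sub_add_cancel hbl]

-- 2^a ≤ x < 2^(a+1) determines a
theorem pow_sandwich {a b x : Nat} (ha1 : 2 ^ a ≤ x) (ha2 : x < 2 ^ (a + 1))
    (hb1 : 2 ^ b ≤ x) (hb2 : x < 2 ^ (b + 1)) : a = b := by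
  by_contra hne
  rcases Nat.lt_or_ge a b with hab | hab
  · exact absurd (le_trans (Nat.pow_le_pow_right (by norm_num) hab) hb1) (by omega)
  · have hab' : b < a := by omega
    exact absurd (le_trans (Nat.pow_le_pow_right (by norm_num) hab') ha1) (by omega)

theorem calc_root_eq (A : List Int) (hA : A.length ≠ 0) :
    calculate_root_index A = ((rootClosed A.length : Nat) : Int) := by
  have hn : 1 ≤ A.length := Nat.one_le_iff_ne_zero.2 hA
  obtain ⟨hH1, hH2⟩ := calcLoopH_spec A.length 0 (by simp)
  obtain ⟨hb1, hb2⟩ := bitLength_h A.length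
  have hEq : PySem.Int.bitLength ((A.length : Int) + 1) - 1 = calcLoopH A.length 0 :=
    pow_sandwich hb1 hb2 hH1 hH2
  unfold calculate_root_index rootClosed
  simp only [hA, if_false, hEq]
  set H := calcLoopH A.length 0 with hHdef
  have hHge1 : 1 ≤ H := by
    rcases Nat.eq_zero_or_pos H with h0 | h1
    · rw [h0] at hH2
      have h21 : (2 : Nat) ^ (0 + 1) = 2 := by norm_num
      omega
    · exact h1
  have hq : 2 ^ H = 2 * 2 ^ (H - 1) := by
    conv_lhs => rw [show H = (H - 1) + 1 by omega]
    rw [Nat.pow_succ]; ring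
  have hq1 : 1 ≤ 2 ^ (H - 1) := Nat.one_le_two_pow
  split <;> (rename_i hcond; congr 1; omega)

-- rangeGo only reads A at positions in [lo, hi)
theorem rangeGo_drop (A : List Int) (a : Nat) : ∀ m lo hi B, hi - lo = m →
    rangeGo (A.drop a) lo hi B = rangeGo A (a + lo) (a + hi) B := by
  intro m
  induction m using Nat.strong_induction_on with
  | _ m ih =>
    intro lo hi B hm
    rw [rangeGo_eq (A.drop a) lo hi B, rangeGo_eq A (a + lo) (a + hi) B]
    by_cases hle : hi ≤ lo
    · rw [if_pos hle, if_pos (by omega : a + hi ≤ a + lo)]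
    · rw [if_neg hle, if_neg (show ¬ a + hi ≤ a + lo by omega)]
      have hsz : a + hi - (a + lo) = hi - lo := by omega
      rw [hsz]
      have hrlt := rootClosed_lt (m := hi - lo) (by omega)
      have hgd : (A.drop a).getD (lo + rootClosed (hi - lo)) 0
          = A.getD (a + lo + rootClosed (hi - lo)) 0 := by
        rw [List.getD_eq_getElem?_getD, List.getD_eq_getElem?_getD, List.getElem?_drop]
        congr 2
        omega
      rw [hgd,
        ih (rootClosed (hi - lo)) (by omega) lo (lo + rootClosed (hi - lo)) _ (by omega),
        ih (hi - (lo + rootClosed (hi - lo) + 1)) (by omega)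
          (lo + rootClosed (hi - lo) + 1) hi _ rfl]
      have e1 : a + (lo + rootClosed (hi - lo)) = a + lo + rootClosed (hi - lo) := by omega
      have e2 : a + (lo + rootClosed (hi - lo) + 1) = a + lo + rootClosed (hi - lo) + 1 := by
        omega
      rw [e1, e2]

theorem rangeGo_take (A : List Int) (k : Nat) : ∀ m lo hi B, hi - lo = m → hi ≤ k →
    rangeGo (A.take k) lo hi B = rangeGo A lo hi B := by
  intro m
  induction m using Nat.strong_induction_on with
  | _ m ih =>
    intro lo hi B hm hk
    rw [rangeGo_eq (A.take k) lo hi B, rangeGo_eq A lo hi B]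
    by_cases hle : hi ≤ lo
    · rw [if_pos hle, if_pos hle]
    · rw [if_neg hle, if_neg hle]
      have hrlt := rootClosed_lt (m := hi - lo) (by omega)
      have hgd : (A.take k).getD (lo + rootClosed (hi - lo)) 0
          = A.getD (lo + rootClosed (hi - lo)) 0 := by
        rw [List.getD_eq_getElem?_getD, List.getD_eq_getElem?_getD,
          List.getElem?_take_of_lt (by omega)]
      rw [hgd,
        ih (rootClosed (hi - lo)) (by omega) lo (lo + rootClosed (hi - lo)) _ (by omega)
          (by omega),
        ih (hi - (lo + rootClosed (hi - lo) + 1)) (by omega)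
          (lo + rootClosed (hi - lo) + 1) hi _ rfl hk]

-- one unfolding of each loop, with the local variables substituted
theorem portA_step (A B : List Int) : complete_bst_seq A B =
    if A.length = 0 then B
    else complete_bst_seq (PySem.List.slice A (some (calculate_root_index A + 1)) none)
      (complete_bst_seq (PySem.List.slice A none (some (calculate_root_index A)))
        (B ++ [PySem.List.pyGetD A (calculate_root_index A) 0])) := by
  rw [complete_bst_seq]
  rfl

theorem altLoop_cons (A : List Int) (lo hi : Nat) (stack : List (Nat × Nat)) (B : List Int) :
    altLoop A ((lo, hi) :: stack) B =
    if hi - lo = 0 then altLoop A stack B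
    else altLoop A ((lo, lo + rootClosed (hi - lo)) :: (lo + rootClosed (hi - lo) + 1, hi) :: stack)
      (B ++ [A.getD (lo + rootClosed (hi - lo)) 0]) := by
  rw [altLoop]

theorem altLoop_nil (A B : List Int) : altLoop A [] B = B := by
  rw [altLoop]

-- port A computes rangeGo
theorem portA_eq_rangeGo : ∀ n (C : List Int), C.length = n → ∀ B,
    complete_bst_seq C B = rangeGo C 0 C.length B := by
  intro n
  induction n using Nat.strong_induction_on with
  | _ n ih =>
    intro C hC B
    rw [portA_step]
    by_cases h0 : C.length = 0
    · rw [if_pos h0, rangeGo_eq, if_pos (by omega)]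
    · rw [if_neg h0]
      have hre := calc_root_eq C h0
      have hrlt := rootClosed_lt (m := C.length) (by omega)
      rw [hre]
      have hs1 : PySem.List.slice C none (some ((rootClosed C.length : Nat) : Int))
          = C.take (rootClosed C.length) := by
        rw [PySem.List.slice_to C (by positivity), Int.toNat_natCast]
      have hs2 : PySem.List.slice C (some (((rootClosed C.length : Nat) : Int) + 1))
          = C.drop (rootClosed C.length + 1) := by
        have hc : (((rootClosed C.length : Nat) : Int) + 1)
            = (((rootClosed C.length + 1 : Nat)) : Int) := by push_cast; ring
        rw [hc, PySem.List.slice_from C (by positivity), Int.toNat_natCast]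
      have hg : PySem.List.pyGetD C ((rootClosed C.length : Nat) : Int) 0
          = C.getD (rootClosed C.length) 0 := by
        simp [PySem.List.pyGetD_natCast, List.getD_eq_getElem?_getD]
      rw [hs1, hs2, hg]
      have hlen1 : (C.take (rootClosed C.length)).length = rootClosed C.length := by
        simp
        omega
      rw [ih (rootClosed C.length) (by omega) _ hlen1, hlen1,
        rangeGo_take C (rootClosed C.length) (rootClosed C.length) 0 (rootClosed C.length) _
          (by omega) le_rfl]
      have hlen2 : (C.drop (rootClosed C.length + 1)).length
          = C.length - (rootClosed C.length + 1) := by simp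
      rw [ih (C.length - (rootClosed C.length + 1)) (by omega) _ hlen2 _, hlen2,
        rangeGo_drop C (rootClosed C.length + 1) (C.length - (rootClosed C.length + 1)) 0
          (C.length - (rootClosed C.length + 1)) _ rfl]
      rw [rangeGo_eq C 0 C.length B, if_neg (by omega : ¬ C.length ≤ 0)]
      have e2 : rootClosed C.length + 1 + (C.length - (rootClosed C.length + 1))
          = C.length := by omega
      simp only [Nat.zero_add, Nat.add_zero, Nat.sub_zero, e2]

-- the stack loop computes rangeGo
theorem altLoop_eq_rangeGo (A : List Int) : ∀ m lo hi stack B, hi - lo = m →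
    altLoop A ((lo, hi) :: stack) B = altLoop A stack (rangeGo A lo hi B) := by
  intro m
  induction m using Nat.strong_induction_on with
  | _ m ih =>
    intro lo hi stack B hm
    rw [altLoop_cons]
    by_cases hz : hi - lo = 0
    · rw [if_pos hz, rangeGo_eq A lo hi B, if_pos (by omega)]
    · rw [if_neg hz]
      have hrlt := rootClosed_lt (m := hi - lo) (by omega)
      rw [ih (rootClosed (hi - lo)) (by omega) lo (lo + rootClosed (hi - lo))
          ((lo + rootClosed (hi - lo) + 1, hi) :: stack) _ (by omega),
        ih (hi - (lo + rootClosed (hi - lo) + 1)) (by omega) (lo + rootClosed (hi - lo) + 1) hi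
          stack _ rfl,
        rangeGo_eq A lo hi B, if_neg (by omega : ¬ hi ≤ lo)]

-- ===== VERDICT (by name: the statement is the Claim_ definition above) =====
theorem complete_bst_seq_spec : Claim_equal_complete_bst_seq := by
  intro A B _
  unfold Spec_complete_bst_seq complete_bst_seq_alt
  rw [altLoop_eq_rangeGo A (A.length - 0) 0 A.length [] B rfl, altLoop_nil,
    portA_eq_rangeGo A.length A rfl B]
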